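-- pv_equiv track=rewrite | github.com/viktoria-malikova/python-programming | assignment7_4/blood_pressures.py | blood_pressure
-- ===== SOURCE A (Python) =====
-- SYSTOLIC_LIMITS = [0, 100, 120, 130, 140, 160, 180]
--
-- DIASTOLIC_LIMITS = [0, 60, 80, 85, 90, 100, 110]
--
-- BLOOD_PRESSURE_DESCRIPTIONS = ['low', 'optimal', 'normal', 'high normal',
--                                'grade 1 hypertension', 'grade 2 hypertension', 'grade 3 hypertension']
--
-- def blood_pressure(list):
--     if list[0] < SYSTOLIC_LIMITS[1] and list[1] < DIASTOLIC_LIMITS[1]: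
--         return BLOOD_PRESSURE_DESCRIPTIONS[0]
--     elif list[0] >= SYSTOLIC_LIMITS[6] or list[1] >= DIASTOLIC_LIMITS[6]:
--         return BLOOD_PRESSURE_DESCRIPTIONS[6]
--     else:
--         i = 0
--         while list[0] >= SYSTOLIC_LIMITS[i] or list[1] >= DIASTOLIC_LIMITS[i]:
--             i += 1
--         return BLOOD_PRESSURE_DESCRIPTIONS[i-1]
-- ===== SOURCE B (Python) =====
-- SYSTOLIC_LIMITS = [0, 100, 120, 130, 140, 160, 180]
--
-- DIASTOLIC_LIMITS = [0, 60, 80, 85, 90, 100, 110]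
--
-- BLOOD_PRESSURE_DESCRIPTIONS = ['low', 'optimal', 'normal', 'high normal',
--                                'grade 1 hypertension', 'grade 2 hypertension', 'grade 3 hypertension']
--
-- def blood_pressure(list):
--     si = 0
--     for j, lim in enumerate(SYSTOLIC_LIMITS):
--         if list[0] >= lim:
--             si = j
--     di = 0
--     for j, lim in enumerate(DIASTOLIC_LIMITS):
--         if list[1] >= lim:
--             di = j
--     return BLOOD_PRESSURE_DESCRIPTIONS[max(si, di)]
-- ===== Notes on version B (the rewrite author's own statement) =====
-- stated objective: simpler
-- what changed: Replaces A's combined-OR while loop plus explicit low/grade-3 guard branches with two independent bracket scans (largest index whose limit the reading meets, for systolic and diastolic separately) and a single max to pick the description.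
import Mathlib
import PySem

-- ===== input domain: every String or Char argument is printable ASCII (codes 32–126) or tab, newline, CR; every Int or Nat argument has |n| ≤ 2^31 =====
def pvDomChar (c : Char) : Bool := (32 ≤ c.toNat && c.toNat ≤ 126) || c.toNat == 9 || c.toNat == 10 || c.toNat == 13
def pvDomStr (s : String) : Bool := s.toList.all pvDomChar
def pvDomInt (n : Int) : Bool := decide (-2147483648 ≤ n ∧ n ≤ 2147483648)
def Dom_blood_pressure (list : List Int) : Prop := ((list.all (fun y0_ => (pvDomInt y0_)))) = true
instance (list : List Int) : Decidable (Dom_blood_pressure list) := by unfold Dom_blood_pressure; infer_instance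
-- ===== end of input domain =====

-- ===== PORT A =====
-- One honest line: B replaces A's combined-OR while loop and guard branches by two
-- independent bracket scans plus a max (simpler decomposition, same cost).
def sysL : List Int := [0, 100, 120, 130, 140, 160, 180]
def diaL : List Int := [0, 60, 80, 85, 90, 100, 110]
def descL : List String := ["low", "optimal", "normal", "high normal",
  "grade 1 hypertension", "grade 2 hypertension", "grade 3 hypertension"]

-- A's while loop: i += 1 while the systolic reading meets SYS[i] or the diastolic meets DIA[i]; fuel 7 suffices
-- because in the reachable branch both readings are below the last limits.
def loopA (s d : Int) (i : Nat) : Nat → Nat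
  | 0 => i
  | fuel + 1 =>
    if s ≥ sysL.getD i 0 ∨ d ≥ diaL.getD i 0 then loopA s d (i + 1) fuel else i

def blood_pressure (list : List Int) : String :=
  let s := list.getD 0 0
  let d := list.getD 1 0
  if s < sysL.getD 1 0 ∧ d < diaL.getD 1 0 then descL.getD 0 ""
  else if s ≥ sysL.getD 6 0 ∨ d ≥ diaL.getD 6 0 then descL.getD 6 ""
  else
    let i := loopA s d 0 7
    descL.getD (i - 1) ""

-- ===== PORT B =====
-- largest index j with x >= limits[j] (0 if none), one left-to-right scan
def bracket (x : Int) (limits : List Int) : Int :=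
  ((PySem.List.enumerate limits).foldl (fun acc jl => if x ≥ jl.2 then jl.1 else acc) 0)

def blood_pressure_alt (list : List Int) : String :=
  let si := bracket (list.getD 0 0) sysL
  let di := bracket (list.getD 1 0) diaL
  (PySem.List.pyGet? descL (max si di)).getD ""

-- ===== PRECONDITION & SPEC =====
-- Both A and B read the first two elements and raise IndexError on shorter lists.
def Pre_blood_pressure (list : List Int) : Prop := 2 ≤ list.length
instance (list : List Int) : Decidable (Pre_blood_pressure list) := by
  unfold Pre_blood_pressure; infer_instance
def pvWitness_blood_pressure : List Int := [125, 82]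
def Spec_blood_pressure (list : List Int) (out : String) : Prop := out = blood_pressure_alt list
instance (list : List Int) (out : String) : Decidable (Spec_blood_pressure list out) := by unfold Spec_blood_pressure; infer_instance

-- ===== CLAIM (what is proved, stated in full; the proofs are below) =====
def Claim_equal_blood_pressure : Prop := ∀ (list : List Int), Dom_blood_pressure list → Pre_blood_pressure list → Spec_blood_pressure list (blood_pressure list)

-- ===== LEMMAS AND PROOFS =====
theorem bracketSys (s : Int) : bracket s sysL =
    if 180 ≤ s then 6 else if 160 ≤ s then 5 else if 140 ≤ s then 4
    else if 130 ≤ s then 3 else if 120 ≤ s then 2 else if 100 ≤ s then 1 else 0 := by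
  simp only [bracket, sysL, PySem.List.enumerate, List.foldl]
  split_ifs <;> omega

theorem bracketDia (d : Int) : bracket d diaL =
    if 110 ≤ d then 6 else if 100 ≤ d then 5 else if 90 ≤ d then 4
    else if 85 ≤ d then 3 else if 80 ≤ d then 2 else if 60 ≤ d then 1 else 0 := by
  simp only [bracket, diaL, PySem.List.enumerate, List.foldl]
  split_ifs <;> omega

set_option maxHeartbeats 4000000 in
theorem core_eq (s d : Int) :
    blood_pressure [s, d] = blood_pressure_alt [s, d] := by
  have hb : blood_pressure_alt [s, d] =
      (PySem.List.pyGet? descL (max (bracket s sysL) (bracket d diaL))).getD "" := rfl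
  rw [hb, bracketSys, bracketDia]
  simp only [blood_pressure, loopA, sysL, diaL, List.getD, List.getElem?_cons_zero,
    List.getElem?_cons_succ, Option.getD_some]
  norm_num
  split_ifs <;> first | rfl | omega

-- ===== VERDICT (by name: the statement is the Claim_ definition above) =====
theorem blood_pressure_spec : Claim_equal_blood_pressure := by
  intro list _ hpre
  match list with
  | a :: b :: rest =>
    show blood_pressure (a :: b :: rest) = blood_pressure_alt (a :: b :: rest)
    have h1 : blood_pressure (a :: b :: rest) = blood_pressure [a, b] := rfl
    have h2 : blood_pressure_alt (a :: b :: rest) = blood_pressure_alt [a, b] := rfl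
    rw [h1, h2, core_eq]
  | [] => simp [Pre_blood_pressure] at hpre
  | [a] => simp [Pre_blood_pressure] at hpre
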